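-- pv_equiv track=rewrite | github.com/yuliaset/DeepRiichi | main.py | better_wait_count_global
-- ===== SOURCE A (Python) =====
-- def is_run(three_nums):
--     return (three_nums[1] == three_nums[0] + 1) and (three_nums[2] == three_nums[1] + 1)
--
-- def is_triplet2(three_nums):
--     return (three_nums[0] == three_nums[1]) and (three_nums[1] == three_nums[2])
--
-- def forms_meld(tiles_nums):
--     from itertools import combinations
--     if len(tiles_nums) < 3:
--         return False
--     for combo in combinations(tiles_nums, 3):
--         if is_run(sorted(combo)) or is_triplet2(combo):
--             return True
--     return False
--
-- def acceptance_of_tiles_global(shape, global_count):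
--     total = 0
--     for t in range(1, 10):
--         available = max(4 - global_count.get(t, 0), 0)
--         if available > 0:
--             if forms_meld(shape + [t]):
--                 total += available
--     return total
--
-- def better_wait_count_global(shape, global_count):
--     original_acc = acceptance_of_tiles_global(shape, global_count)
--     improve_sum = 0
--     for t in range(1, 10):
--         available = max(4 - global_count.get(t, 0), 0)
--         if available == 0:
--             continue
--         if forms_meld(shape + [t]):
--             continue
--         new_acc = acceptance_of_tiles_global(shape + [t], global_count)
--         if new_acc > original_acc:
--             improve_sum += available
--     return improve_sum
-- ===== SOURCE B (Python) =====
-- def better_wait_count_global(shape, global_count):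
--     cnt = {}
--     for x in shape:
--         cnt[x] = cnt.get(x, 0) + 1
--
--     def melds(c):
--         # meld exists iff some tile occurs >= 3 times (triplet)
--         # or three consecutive values are all present (run)
--         if any(k >= 3 for k in c.values()):
--             return True
--         return any(v + 1 in c and v + 2 in c for v in c)
--
--     def with_tile(c, t):
--         d = dict(c)
--         d[t] = d.get(t, 0) + 1
--         return d
--
--     def avail(t):
--         return max(4 - global_count.get(t, 0), 0)
--
--     def acceptance(c):
--         return sum(avail(u) for u in range(1, 10)
--                    if avail(u) > 0 and melds(with_tile(c, u)))
--
--     original = acceptance(cnt)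
--     return sum(avail(t) for t in range(1, 10)
--                if avail(t) > 0 and not melds(with_tile(cnt, t))
--                and acceptance(with_tile(cnt, t)) > original)
-- ===== Notes on version B (the rewrite author's own statement) =====
-- stated objective: faster
-- what changed: A tests for a meld by scanning all C(n,3) 3-combinations (sorting each) on every probe; B builds one tile-count dictionary for the shape and tests a meld in one pass over it (triplet iff some count >= 3, run iff v, v+1, v+2 are all present), bumping the counter per candidate tile.
import Mathlib
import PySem

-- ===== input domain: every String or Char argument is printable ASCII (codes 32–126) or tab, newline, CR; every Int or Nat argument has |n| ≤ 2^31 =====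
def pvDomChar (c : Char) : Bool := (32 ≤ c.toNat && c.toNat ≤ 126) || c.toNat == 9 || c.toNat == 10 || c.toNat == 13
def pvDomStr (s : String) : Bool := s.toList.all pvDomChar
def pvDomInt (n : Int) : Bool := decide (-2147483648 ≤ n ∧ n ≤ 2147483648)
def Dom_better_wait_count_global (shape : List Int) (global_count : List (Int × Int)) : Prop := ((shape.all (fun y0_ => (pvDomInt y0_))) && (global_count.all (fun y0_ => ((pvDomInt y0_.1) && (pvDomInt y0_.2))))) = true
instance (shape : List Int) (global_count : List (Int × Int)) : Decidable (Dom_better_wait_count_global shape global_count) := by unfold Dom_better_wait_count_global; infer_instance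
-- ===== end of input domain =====

-- B replaces A's O(n^3) scan of all 3-combinations per meld test by an O(n) test on a
-- tile-count dictionary built once (triplet ⇔ some count ≥ 3, run ⇔ v, v+1, v+2 all present).

-- ===== PORT A =====

-- only ever applied to length-3 lists (3-combinations); the match reads indices 0,1,2 exactly there
def is_run (three_nums : List Int) : Bool :=
  match three_nums with
  | a :: b :: c :: _ => (b == a + 1) && (c == b + 1)
  | _ => false

def is_triplet2 (three_nums : List Int) : Bool :=
  match three_nums with
  | a :: b :: c :: _ => (a == b) && (b == c)
  | _ => false

def forms_meld (tiles_nums : List Int) : Bool :=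
  if tiles_nums.length < 3 then false
  else (PySem.List.combinations tiles_nums 3).any
        (fun combo => is_run (PySem.List.sorted combo (fun x => x) false) || is_triplet2 combo)

def acceptance_of_tiles_global (shape : List Int) (global_count : List (Int × Int)) : Int :=
  (PySem.List.pyRange 1 10 1).foldl (fun total t =>
    let available := max (4 - (PySem.Dict.mk global_count).getD t 0) 0
    if available > 0 then
      if forms_meld (shape ++ [t]) then total + available else total
    else total) 0

def better_wait_count_global (shape : List Int) (global_count : List (Int × Int)) : Int :=
  let original_acc := acceptance_of_tiles_global shape global_count
  (PySem.List.pyRange 1 10 1).foldl (fun improve_sum t =>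
    let available := max (4 - (PySem.Dict.mk global_count).getD t 0) 0
    if available == 0 then improve_sum
    else if forms_meld (shape ++ [t]) then improve_sum
    else if acceptance_of_tiles_global (shape ++ [t]) global_count > original_acc then
      improve_sum + available
    else improve_sum) 0

-- ===== PORT B =====

def bwcgMelds (c : PySem.Dict Int Int) : Bool :=
  c.values.any (fun k => k ≥ 3) ||
  c.keys.any (fun v => c.contains (v + 1) && c.contains (v + 2))

def bwcgWithTile (c : PySem.Dict Int Int) (t : Int) : PySem.Dict Int Int :=
  c.insert t (c.getD t 0 + 1)

def bwcgAvail (global_count : List (Int × Int)) (t : Int) : Int :=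
  max (4 - (PySem.Dict.mk global_count).getD t 0) 0

def bwcgAcceptance (global_count : List (Int × Int)) (c : PySem.Dict Int Int) : Int :=
  (((PySem.List.pyRange 1 10 1).filter
      (fun u => bwcgAvail global_count u > 0 && bwcgMelds (bwcgWithTile c u))).map
    (fun u => bwcgAvail global_count u)).sum

def better_wait_count_global_alt (shape : List Int) (global_count : List (Int × Int)) : Int :=
  let cnt := shape.foldl (fun d x => d.insert x (d.getD x 0 + 1)) PySem.Dict.empty
  let original := bwcgAcceptance global_count cnt
  (((PySem.List.pyRange 1 10 1).filter
      (fun t => bwcgAvail global_count t > 0 && !bwcgMelds (bwcgWithTile cnt t) &&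
                bwcgAcceptance global_count (bwcgWithTile cnt t) > original)).map
    (fun t => bwcgAvail global_count t)).sum

-- ===== PRECONDITION & SPEC =====
def Spec_better_wait_count_global (shape : List Int) (global_count : List (Int × Int)) (out : Int) : Prop := out = better_wait_count_global_alt shape global_count
instance (shape : List Int) (global_count : List (Int × Int)) (out : Int) : Decidable (Spec_better_wait_count_global shape global_count out) := by unfold Spec_better_wait_count_global; infer_instance

-- ===== CLAIM (what is proved, stated in full; the proofs are below) =====
def Claim_equal_better_wait_count_global : Prop := ∀ (shape : List Int) (global_count : List (Int × Int)), Dom_better_wait_count_global shape global_count → Spec_better_wait_count_global shape global_count (better_wait_count_global shape global_count)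

-- ===== LEMMAS AND PROOFS =====

-- the meld property both meld tests decide
def MeldP (xs : List Int) : Prop :=
  (∃ v ∈ xs, 3 ≤ xs.count v) ∨ (∃ v ∈ xs, (v + 1) ∈ xs ∧ (v + 2) ∈ xs)

lemma forms_meld_iff (xs : List Int) : forms_meld xs = true ↔ MeldP xs := by
  constructor
  · intro h
    unfold forms_meld at h
    split at h
    · simp at h
    · rcases List.any_eq_true.mp h with ⟨c, hc, hprop⟩
      rcases (PySem.List.mem_combinations_iff xs 3 c).mp hc with ⟨hsub, hlen⟩
      match c, hlen with
      | [a, b, d], _ =>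
        rcases Bool.or_eq_true _ _ |>.mp hprop with hrun | htri
        · -- run on sorted combo
          have hperm : (PySem.List.sorted [a, b, d] (fun x => x) false).Perm [a, b, d] :=
            PySem.List.sorted_perm _ _ _
          have hlen3 : (PySem.List.sorted [a, b, d] (fun x => x) false).length = 3 := by
            simp
          match hs : PySem.List.sorted [a, b, d] (fun x => x) false, hlen3 with
          | [x, y, z], _ =>
            rw [hs] at hrun hperm
            simp only [is_run, Bool.and_eq_true, beq_iff_eq] at hrun
            right
            refine ⟨x, ?_, ?_, ?_⟩
            · exact hsub.subset (hperm.mem_iff.mp (by simp))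
            · rw [← hrun.1]; exact hsub.subset (hperm.mem_iff.mp (by simp))
            · have hz : z = x + 2 := by omega
              rw [← hz]; exact hsub.subset (hperm.mem_iff.mp (by simp))
        · simp only [is_triplet2, Bool.and_eq_true, beq_iff_eq] at htri
          obtain ⟨rfl, rfl⟩ := htri
          left
          refine ⟨a, hsub.subset (by simp), ?_⟩
          calc 3 = List.count a [a, a, a] := by simp
            _ ≤ xs.count a := hsub.count_le a
  · intro h
    rcases h with ⟨v, hv, hcnt⟩ | ⟨v, hv, hv1, hv2⟩
    · have hsub : List.Sublist [v, v, v] xs := by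
        have h2 : List.Sublist (List.replicate 3 v) xs := List.replicate_sublist_iff.mpr hcnt
        simpa using h2
      have hlen : ¬ xs.length < 3 := by
        have h3 := hsub.length_le
        simp at h3
        omega
      unfold forms_meld
      rw [if_neg hlen]
      refine List.any_eq_true.mpr ⟨[v, v, v], ?_, ?_⟩
      · exact (PySem.List.mem_combinations_iff xs 3 _).mpr ⟨hsub, rfl⟩
      · simp [is_triplet2]
    · have hnd : ([v, v + 1, v + 2] : List Int).Nodup := by
        simp
      have hss : ([v, v + 1, v + 2] : List Int) ⊆ xs := by
        intro x hx; simp at hx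
        rcases hx with rfl | rfl | rfl <;> assumption
      rcases hnd.subperm hss with ⟨c, hperm, hsub⟩
      have hlenc : c.length = 3 := by simpa using hperm.length_eq
      have hsorted : PySem.List.sorted c (fun x => x) false = [v, v + 1, v + 2] :=
        PySem.List.sorted_eq_of_perm_of_pairwise_lt c [v, v + 1, v + 2] (fun x => x)
          hperm.symm (by simp)
      have hlen : ¬ xs.length < 3 := by
        have := hsub.length_le; omega
      unfold forms_meld
      rw [if_neg hlen]
      refine List.any_eq_true.mpr ⟨c, ?_, ?_⟩
      · exact (PySem.List.mem_combinations_iff xs 3 _).mpr ⟨hsub, hlenc⟩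
      · rw [hsorted]
        simp [is_run]
        exact Or.inl (by omega)

lemma bwcgMelds_counter_iff (xs : List Int) :
    bwcgMelds (PySem.Dict.counter xs) = true ↔ MeldP xs := by
  simp [bwcgMelds, MeldP, PySem.Dict.values, PySem.Dict.items_counter,
    PySem.Dict.keys_counter, PySem.Dict.contains_counter, PySem.Set.mem_ofList,
    List.any_map]

lemma melds_eq (xs : List Int) :
    bwcgMelds (PySem.Dict.counter xs) = forms_meld xs := by
  by_cases h : MeldP xs
  · rw [(bwcgMelds_counter_iff xs).mpr h, (forms_meld_iff xs).mpr h]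
  · rw [Bool.eq_false_iff.mpr fun hc => h ((bwcgMelds_counter_iff xs).mp hc),
        Bool.eq_false_iff.mpr fun hc => h ((forms_meld_iff xs).mp hc)]

lemma withTile_counter (xs : List Int) (t : Int) :
    bwcgWithTile (PySem.Dict.counter xs) t = PySem.Dict.counter (xs ++ [t]) := by
  rw [← PySem.Dict.foldl_insert_getD_add_one_eq_counter,
      ← PySem.Dict.foldl_insert_getD_add_one_eq_counter, List.foldl_append]
  rfl

-- the shared loop shape: a conditional running sum is a sum over the filtered list
lemma foldl_if_sum (l : List Int) (p : Int → Bool) (f : Int → Int) (a : Int) :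
    l.foldl (fun tot t => if p t then tot + f t else tot) a
      = a + ((l.filter p).map f).sum := by
  induction l generalizing a with
  | nil => simp
  | cons x xs ih =>
    by_cases h : p x = true <;> simp [h, ih] <;> ring

lemma acceptance_eq (xs : List Int) (gc : List (Int × Int)) :
    bwcgAcceptance gc (PySem.Dict.counter xs) = acceptance_of_tiles_global xs gc := by
  unfold bwcgAcceptance acceptance_of_tiles_global
  rw [PySem.List.foldl_congr_mem
      (g := fun total t => if (bwcgAvail gc t > 0 && bwcgMelds (bwcgWithTile (PySem.Dict.counter xs) t)) then total + bwcgAvail gc t else total)]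
  · rw [foldl_if_sum]; ring
  · intro acc t _
    rw [withTile_counter, melds_eq]
    simp only [bwcgAvail]
    by_cases h1 : max (4 - (PySem.Dict.mk gc).getD t 0) 0 > 0 <;>
      by_cases h2 : forms_meld (xs ++ [t]) = true <;>
      simp [h1, h2]

theorem better_wait_count_global_spec_aux (shape : List Int) (gc : List (Int × Int)) :
    better_wait_count_global shape gc = better_wait_count_global_alt shape gc := by
  unfold better_wait_count_global better_wait_count_global_alt
  rw [PySem.Dict.foldl_insert_getD_add_one_eq_counter]
  rw [PySem.List.foldl_congr_mem
      (g := fun improve_sum t =>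
        if (bwcgAvail gc t > 0 && !bwcgMelds (bwcgWithTile (PySem.Dict.counter shape) t) &&
            bwcgAcceptance gc (bwcgWithTile (PySem.Dict.counter shape) t) >
              bwcgAcceptance gc (PySem.Dict.counter shape))
        then improve_sum + bwcgAvail gc t else improve_sum)]
  · rw [foldl_if_sum]; ring
  · intro acc t _
    rw [withTile_counter, melds_eq, acceptance_eq, acceptance_eq]
    simp only [bwcgAvail]
    have hnn : (0 : Int) ≤ max (4 - (PySem.Dict.mk gc).getD t 0) 0 := le_max_right _ _
    by_cases h0 : max (4 - (PySem.Dict.mk gc).getD t 0) 0 = 0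
    · simp [h0]
    · have hpos : max (4 - (PySem.Dict.mk gc).getD t 0) 0 > 0 := lt_of_le_of_ne hnn (Ne.symm h0)
      by_cases h2 : forms_meld (shape ++ [t]) = true <;>
        by_cases h3 : acceptance_of_tiles_global (shape ++ [t]) gc > acceptance_of_tiles_global shape gc <;>
        simp [h0, hpos, h2, h3]

-- ===== VERDICT (by name: the statement is the Claim_ definition above) =====
theorem better_wait_count_global_spec : Claim_equal_better_wait_count_global := by
  intro shape gc _
  unfold Spec_better_wait_count_global
  exact better_wait_count_global_spec_aux shape gc
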